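-- pv_equiv track=rewrite | github.com/mikhashev/dpc-messenger | dpc-client/core/dpc_client_core/managers/prompt_manager.py | _format_special_instructions
-- ===== SOURCE A (Python) =====
-- def _format_special_instructions(instructions_obj: dict) -> str:
--     """Format special instructions from device context schema v1.1+.
--
--     Args:
--         instructions_obj: Special instructions dictionary
--
--     Returns:
--         Formatted special instructions text
--     """
--     text = "\nDEVICE CONTEXT INTERPRETATION RULES:\n"
--
--     if "interpretation" in instructions_obj:
--         text += "\nInterpretation Guidelines:\n"
--         for key, value in instructions_obj["interpretation"].items():
--             text += f"  - {key}: {value}\n"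
--
--     if "privacy" in instructions_obj:
--         text += "\nPrivacy Rules:\n"
--         for key, value in instructions_obj["privacy"].items():
--             text += f"  - {key}: {value}\n"
--
--     if "update_protocol" in instructions_obj:
--         text += "\nUpdate Protocol:\n"
--         for key, value in instructions_obj["update_protocol"].items():
--             text += f"  - {key}: {value}\n"
--
--     if "usage_scenarios" in instructions_obj:
--         text += "\nUsage Scenarios:\n"
--         for key, value in instructions_obj["usage_scenarios"].items():
--             text += f"  - {key}: {value}\n"
--
--     text += "\n"
--     return text
-- ===== SOURCE B (Python) =====
-- def _format_special_instructions(instructions_obj: dict) -> str: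
--     """Format special instructions from device context schema v1.1+."""
--
--     def go(sections):
--         # Recursion over the remaining sections, building the text back-to-front:
--         # the tail of the output is computed first, then the current section
--         # (if present) is prepended to it.
--         if not sections:
--             return "\n"
--         (key, header), rest = sections[0], sections[1:]
--         tail = go(rest)
--         if key not in instructions_obj:
--             return tail
--         body = "".join(f"  - {k}: {v}\n" for k, v in instructions_obj[key].items())
--         return "\n" + header + "\n" + body + tail
--
--     return "\nDEVICE CONTEXT INTERPRETATION RULES:\n" + go([
--         ("interpretation", "Interpretation Guidelines:"),
--         ("privacy", "Privacy Rules:"),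
--         ("update_protocol", "Update Protocol:"),
--         ("usage_scenarios", "Usage Scenarios:"),
--     ])
-- ===== Notes on version B (the rewrite author's own statement) =====
-- stated objective: alternative
-- what changed: Replaces A's iterative forward string accumulation over four guarded blocks with a recursive decomposition over the section table that builds the output back-to-front, rendering each section's body with a single join and prepending it to the recursively built tail.
import Mathlib
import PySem

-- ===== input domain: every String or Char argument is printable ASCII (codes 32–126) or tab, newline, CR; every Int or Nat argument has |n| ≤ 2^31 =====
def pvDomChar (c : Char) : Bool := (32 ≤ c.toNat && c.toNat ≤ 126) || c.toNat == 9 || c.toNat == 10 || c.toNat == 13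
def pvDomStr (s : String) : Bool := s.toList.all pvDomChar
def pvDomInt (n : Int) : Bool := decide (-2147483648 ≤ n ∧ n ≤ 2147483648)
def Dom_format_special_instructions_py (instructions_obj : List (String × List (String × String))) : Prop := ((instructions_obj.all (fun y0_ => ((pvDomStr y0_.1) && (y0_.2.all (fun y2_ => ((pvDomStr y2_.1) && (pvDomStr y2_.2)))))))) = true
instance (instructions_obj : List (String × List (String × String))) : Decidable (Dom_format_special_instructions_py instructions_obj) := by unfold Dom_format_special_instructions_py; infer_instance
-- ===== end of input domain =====

-- B replaces A's forward iterative accumulation over four guarded blocks with a recursive,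
-- back-to-front construction over the section table (tail built first, sections prepended);
-- objective: alternative decomposition.


-- ===== PORT A =====
-- 'key in dict' / 'dict[key]' together → first-match lookup on the association list
def format_special_instructions_py (instructions_obj : List (String × List (String × String))) : String :=
  let text := "\nDEVICE CONTEXT INTERPRETATION RULES:\n"
  let text := match instructions_obj.lookup "interpretation" with
    | some d => d.foldl (fun t kv => t ++ "  - " ++ kv.1 ++ ": " ++ kv.2 ++ "\n")
        (text ++ "\nInterpretation Guidelines:\n")
    | none => text
  let text := match instructions_obj.lookup "privacy" with
    | some d => d.foldl (fun t kv => t ++ "  - " ++ kv.1 ++ ": " ++ kv.2 ++ "\n")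
        (text ++ "\nPrivacy Rules:\n")
    | none => text
  let text := match instructions_obj.lookup "update_protocol" with
    | some d => d.foldl (fun t kv => t ++ "  - " ++ kv.1 ++ ": " ++ kv.2 ++ "\n")
        (text ++ "\nUpdate Protocol:\n")
    | none => text
  let text := match instructions_obj.lookup "usage_scenarios" with
    | some d => d.foldl (fun t kv => t ++ "  - " ++ kv.1 ++ ": " ++ kv.2 ++ "\n")
        (text ++ "\nUsage Scenarios:\n")
    | none => text
  text ++ "\n"

-- ===== PORT B =====
-- B's recursive helper 'go': recursion over the remaining sections, tail computed first,
-- the current section (if present) prepended back-to-front.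
def pvGo (instructions_obj : List (String × List (String × String))) :
    List (String × String) → String
  | [] => "\n"
  | (key, header) :: rest =>
    let tail := pvGo instructions_obj rest
    match instructions_obj.lookup key with
    | none => tail
    | some d =>
      let body := String.join (d.map (fun kv => "  - " ++ kv.1 ++ ": " ++ kv.2 ++ "\n"))
      "\n" ++ header ++ "\n" ++ body ++ tail

def format_special_instructions_py_alt (instructions_obj : List (String × List (String × String))) : String :=
  "\nDEVICE CONTEXT INTERPRETATION RULES:\n" ++ pvGo instructions_obj
    [("interpretation", "Interpretation Guidelines:"),
     ("privacy", "Privacy Rules:"),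
     ("update_protocol", "Update Protocol:"),
     ("usage_scenarios", "Usage Scenarios:")]

-- ===== PRECONDITION & SPEC =====
def Spec_format_special_instructions_py (instructions_obj : List (String × List (String × String))) (out : String) : Prop := out = format_special_instructions_py_alt instructions_obj
instance (instructions_obj : List (String × List (String × String))) (out : String) : Decidable (Spec_format_special_instructions_py instructions_obj out) := by unfold Spec_format_special_instructions_py; infer_instance

-- ===== CLAIM (what is proved, stated in full; the proofs are below) =====
def Claim_equal_format_special_instructions_py : Prop := ∀ (instructions_obj : List (String × List (String × String))), Dom_format_special_instructions_py instructions_obj → Spec_format_special_instructions_py instructions_obj (format_special_instructions_py instructions_obj)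

-- ===== LEMMAS AND PROOFS =====
lemma join_cons (a : String) (l : List String) : String.join (a :: l) = a ++ String.join l := by
  have h : (String.join (a :: l)).toList = (a ++ String.join l).toList := by simp
  exact String.toList_inj.mp h

-- A's append-accumulator fold over a section equals prefix ++ joined mapped lines.
lemma foldl_append_join (d : List (String × String)) (t : String) :
    d.foldl (fun t kv => t ++ "  - " ++ kv.1 ++ ": " ++ kv.2 ++ "\n") t
      = t ++ String.join (d.map (fun kv => "  - " ++ kv.1 ++ ": " ++ kv.2 ++ "\n")) := by
  induction d generalizing t with
  | nil => simp [String.join]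
  | cons hd tl ih =>
    rw [List.foldl_cons, ih, List.map_cons, join_cons]
    simp [String.append_assoc]

-- ===== VERDICT (by name: the statement is the Claim_ definition above) =====
theorem format_special_instructions_py_spec : Claim_equal_format_special_instructions_py := by
  intro obj _
  unfold Spec_format_special_instructions_py format_special_instructions_py format_special_instructions_py_alt
  simp only [pvGo]
  rcases obj.lookup "interpretation" with _ | d1 <;>
  rcases obj.lookup "privacy" with _ | d2 <;>
  rcases obj.lookup "update_protocol" with _ | d3 <;>
  rcases obj.lookup "usage_scenarios" with _ | d4 <;>
  simp only [foldl_append_join] <;>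
  (simp [← String.append_assoc]; try rfl)
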